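-- pv_equiv track=rewrite | github.com/KaiboLiu/CS519-010-ALG | hw10/rna.py | best2
-- ===== SOURCE A (Python) =====
-- from collections import defaultdict
--
-- p = {'AU','UA','CG','GC','UG','GU'}
--
-- def best2(s):
--     opt, strc = defaultdict(int), defaultdict(lambda:'.')
--     l = len(s)
--
--     if l < 1: return 0,''
--     for d in range(2,l+1):  # d=delta range, length of range[i,j], s[i]..s[j-1]
--         for i in range(l-d+1):    # j=i+d
--             j = i+d
--             if s[i]+s[j-1] in p:
--                 opt[i,j] = opt[i+1,j-1] + 1
--                 strc[i,j] = '(' + strc[i+1,j-1] + ')'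
--             for k in range(i+1,j):  #k = i+1..j-1
--                 if opt[i,k]+opt[k,j] > opt[i,j]:
--                     opt[i,j] = opt[i,k]+opt[k,j]
--                     strc[i,j] = strc[i,k] + strc[k,j]
--             if opt[i,j] == 0:
--                 strc[i,j] = '.' * (j-i)
--     return opt[0,l], strc[0,l]
-- ===== SOURCE B (Python) =====
-- from functools import lru_cache
--
-- p = {'AU','UA','CG','GC','UG','GU'}
--
-- def best2(s):
--     # Top-down memoized recursion over half-open intervals [i, j) instead of
--     # A's bottom-up table fill; reproduces A's defaultdict base values.
--     @lru_cache(maxsize=None)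
--     def solve(i, j):
--         if j - i < 2:
--             return 0, '.'
--         o, st = 0, ''
--         if s[i] + s[j-1] in p:
--             io, ist = solve(i+1, j-1)
--             o, st = io + 1, '(' + ist + ')'
--         for k in range(i+1, j):
--             a1, st1 = solve(i, k)
--             a2, st2 = solve(k, j)
--             if a1 + a2 > o:
--                 o, st = a1 + a2, st1 + st2
--         if o == 0:
--             st = '.' * (j - i)
--         return o, st
--
--     l = len(s)
--     if l < 1:
--         return 0, ''
--     return solve(0, l)
-- ===== Notes on version B (the rewrite author's own statement) =====
-- stated objective: alternative
-- what changed: Replaces the bottom-up two-dict (defaultdict) table fill over increasing interval lengths with a top-down lru_cache-memoized recursion solve(i,j) over half-open intervals.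
import Mathlib
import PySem

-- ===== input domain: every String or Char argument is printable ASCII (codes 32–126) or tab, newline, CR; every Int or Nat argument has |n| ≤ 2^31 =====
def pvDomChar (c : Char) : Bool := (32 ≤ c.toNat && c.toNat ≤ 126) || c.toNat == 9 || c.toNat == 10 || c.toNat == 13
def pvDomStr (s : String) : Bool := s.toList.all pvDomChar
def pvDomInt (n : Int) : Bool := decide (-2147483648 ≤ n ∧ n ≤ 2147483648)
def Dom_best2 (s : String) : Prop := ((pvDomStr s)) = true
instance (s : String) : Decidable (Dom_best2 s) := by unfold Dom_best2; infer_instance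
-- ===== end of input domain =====

-- B replaces A's bottom-up two-defaultdict table fill with a top-down memoized
-- recursion over half-open intervals (alternative decomposition, same results).

-- shared module-level context: the set p and the expression s[i]+s[j-1] in p
def pvPairs : PySem.Set String := PySem.Set.ofList ["AU", "UA", "CG", "GC", "UG", "GU"]

def pvPairOK (cs : List Char) (i j : Int) : Bool :=
  match PySem.List.pyGet? cs i, PySem.List.pyGet? cs (j - 1) with
  | some a, some b => PySem.Set.contains pvPairs (String.ofList [a, b])
  | _, _ => false

-- '.' * n
def pvDots (n : Int) : String := String.ofList (PySem.List.pyRepeat ['.'] n)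

abbrev PvDicts := PySem.Dict (Int × Int) Int × PySem.Dict (Int × Int) String

-- ===== PORT A =====
-- body of A's loop over i (one cell (i, j), j = i + d): the pair test, the k loop, the o == 0 patch
def cellA (cs : List Char) (d : Int) (t : PvDicts) (i : Int) : PvDicts :=
  let j := i + d
  let t1 :=
    if pvPairOK cs i j then
      (t.1.insert (i, j) (t.1.getD (i + 1, j - 1) 0 + 1),
       t.2.insert (i, j) ("(" ++ t.2.getD (i + 1, j - 1) "." ++ ")"))
    else t
  let t2 := (PySem.List.pyRange (i + 1) j 1).foldl (fun t k =>
      if t.1.getD (i, k) 0 + t.1.getD (k, j) 0 > t.1.getD (i, j) 0 then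
        (t.1.insert (i, j) (t.1.getD (i, k) 0 + t.1.getD (k, j) 0),
         t.2.insert (i, j) (t.2.getD (i, k) "." ++ t.2.getD (k, j) "."))
      else t) t1
  if t2.1.getD (i, j) 0 == 0 then (t2.1, t2.2.insert (i, j) (pvDots (j - i))) else t2

def best2 (s : String) : Int × String :=
  let cs := s.toList
  let l : Int := (cs.length : Int)
  if l < 1 then (0, "")
  else
    let t := (PySem.List.pyRange 2 (l + 1) 1).foldl (fun t d =>
        (PySem.List.pyRange 0 (l - d + 1) 1).foldl (cellA cs d) t)
      (PySem.Dict.empty, PySem.Dict.empty)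
    (t.1.getD (0, l) 0, t.2.getD (0, l) ".")

-- ===== PORT B =====
-- top-down recursion on the half-open interval [i, j); the lru_cache memo is a
-- value-transparent optimisation, so the port is the recursion itself
def solveB (cs : List Char) (i j : Int) : Int × String :=
  if j - i < 2 then (0, ".")
  else
    let init : Int × String :=
      if pvPairOK cs i j then
        let r := solveB cs (i + 1) (j - 1)
        (r.1 + 1, "(" ++ r.2 ++ ")")
      else (0, "")
    let res := (PySem.List.pyRange (i + 1) j 1).attach.foldl (fun acc k =>
        let r1 := solveB cs i k.1
        let r2 := solveB cs k.1 j
        if r1.1 + r2.1 > acc.1 then (r1.1 + r2.1, r1.2 ++ r2.2) else acc) init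
    if res.1 == 0 then (res.1, pvDots (j - i)) else res
termination_by (j - i).toNat
decreasing_by
  · omega
  · have hk := PySem.List.mem_pyRange_one.mp k.2; omega
  · have hk := PySem.List.mem_pyRange_one.mp k.2; omega

def best2_alt (s : String) : Int × String :=
  let cs := s.toList
  let l : Int := (cs.length : Int)
  if l < 1 then (0, "") else solveB cs 0 l

-- ===== PRECONDITION & SPEC =====
def Spec_best2 (s : String) (out : Int × String) : Prop := out = best2_alt s
instance (s : String) (out : Int × String) : Decidable (Spec_best2 s out) := by unfold Spec_best2; infer_instance

-- ===== CLAIM (what is proved, stated in full; the proofs are below) =====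
def Claim_equal_best2 : Prop := ∀ (s : String), Dom_best2 s → Spec_best2 s (best2 s)

-- ===== LEMMAS AND PROOFS =====

-- the two dict entries A keeps for a cell (a, b), read with the defaultdict defaults
def pvVal (t : PvDicts) (a b : Int) : Int × String := (t.1.getD (a, b) 0, t.2.getD (a, b) ".")

-- invariant after A has processed all lengths < d and, at length d, all starts < i
def pvInv (cs : List Char) (d i : Int) (t : PvDicts) : Prop :=
  (∀ a b : Int, 0 ≤ a → b ≤ (cs.length : Int) → (b - a < d ∨ (b - a = d ∧ a < i)) →
      pvVal t a b = solveB cs a b)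
  ∧ (∀ a b : Int, (d < b - a ∨ (b - a = d ∧ i ≤ a)) →
      t.1.contains (a, b) = false ∧ t.2.contains (a, b) = false)

theorem pv_kfold (cs : List Char) (d i j : Int) (hj : j = i + d) (_h2 : 2 ≤ d)
    (hi : 0 ≤ i) (hl : j ≤ (cs.length : Int)) (ks : List Int)
    (hks : ∀ k ∈ ks, i + 1 ≤ k ∧ k < j) (t : PvDicts) (w : Int × String)
    (hval : ∀ a b : Int, 0 ≤ a → b ≤ (cs.length : Int) → (b - a < d ∨ (b - a = d ∧ a < i)) →
      pvVal t a b = solveB cs a b)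
    (hfr : ∀ a b : Int, (d < b - a ∨ (b - a = d ∧ i < a)) →
      t.1.contains (a, b) = false ∧ t.2.contains (a, b) = false)
    (hcell : t.1.getD (i, j) 0 = w.1 ∧ (w.1 = 0 ∨ t.2.getD (i, j) "." = w.2)) :
    (∀ a b : Int, 0 ≤ a → b ≤ (cs.length : Int) → (b - a < d ∨ (b - a = d ∧ a < i)) →
      pvVal (ks.foldl (fun t k =>
        if t.1.getD (i, k) 0 + t.1.getD (k, j) 0 > t.1.getD (i, j) 0 then
          (t.1.insert (i, j) (t.1.getD (i, k) 0 + t.1.getD (k, j) 0),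
           t.2.insert (i, j) (t.2.getD (i, k) "." ++ t.2.getD (k, j) "."))
        else t) t) a b = solveB cs a b)
    ∧ (∀ a b : Int, (d < b - a ∨ (b - a = d ∧ i < a)) →
      (ks.foldl (fun t k =>
        if t.1.getD (i, k) 0 + t.1.getD (k, j) 0 > t.1.getD (i, j) 0 then
          (t.1.insert (i, j) (t.1.getD (i, k) 0 + t.1.getD (k, j) 0),
           t.2.insert (i, j) (t.2.getD (i, k) "." ++ t.2.getD (k, j) "."))
        else t) t).1.contains (a, b) = false ∧
      (ks.foldl (fun t k =>
        if t.1.getD (i, k) 0 + t.1.getD (k, j) 0 > t.1.getD (i, j) 0 then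
          (t.1.insert (i, j) (t.1.getD (i, k) 0 + t.1.getD (k, j) 0),
           t.2.insert (i, j) (t.2.getD (i, k) "." ++ t.2.getD (k, j) "."))
        else t) t).2.contains (a, b) = false)
    ∧ (ks.foldl (fun t k =>
        if t.1.getD (i, k) 0 + t.1.getD (k, j) 0 > t.1.getD (i, j) 0 then
          (t.1.insert (i, j) (t.1.getD (i, k) 0 + t.1.getD (k, j) 0),
           t.2.insert (i, j) (t.2.getD (i, k) "." ++ t.2.getD (k, j) "."))
        else t) t).1.getD (i, j) 0 =
      (ks.foldl (fun acc k =>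
        let r1 := solveB cs i k
        let r2 := solveB cs k j
        if r1.1 + r2.1 > acc.1 then (r1.1 + r2.1, r1.2 ++ r2.2) else acc) w).1
    ∧ ((ks.foldl (fun acc k =>
        let r1 := solveB cs i k
        let r2 := solveB cs k j
        if r1.1 + r2.1 > acc.1 then (r1.1 + r2.1, r1.2 ++ r2.2) else acc) w).1 = 0 ∨
      (ks.foldl (fun t k =>
        if t.1.getD (i, k) 0 + t.1.getD (k, j) 0 > t.1.getD (i, j) 0 then
          (t.1.insert (i, j) (t.1.getD (i, k) 0 + t.1.getD (k, j) 0),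
           t.2.insert (i, j) (t.2.getD (i, k) "." ++ t.2.getD (k, j) "."))
        else t) t).2.getD (i, j) "." =
      (ks.foldl (fun acc k =>
        let r1 := solveB cs i k
        let r2 := solveB cs k j
        if r1.1 + r2.1 > acc.1 then (r1.1 + r2.1, r1.2 ++ r2.2) else acc) w).2) := by
  induction ks generalizing t w with
  | nil =>
    exact ⟨hval, hfr, hcell.1, hcell.2.elim Or.inl Or.inr⟩
  | cons k ks ih =>
    obtain ⟨hk1, hk2⟩ := hks k (List.mem_cons_self ..)
    have hks' : ∀ x ∈ ks, i + 1 ≤ x ∧ x < j := fun x hx => hks x (List.mem_cons_of_mem _ hx)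
    have hik := hval i k hi (by omega) (Or.inl (by omega))
    have hkj := hval k j (by omega) hl (Or.inl (by omega))
    have hik1 := congrArg Prod.fst hik
    have hik2 := congrArg Prod.snd hik
    have hkj1 := congrArg Prod.fst hkj
    have hkj2 := congrArg Prod.snd hkj
    simp only [pvVal] at hik1 hik2 hkj1 hkj2
    simp only [List.foldl_cons]
    by_cases hc : (solveB cs i k).1 + (solveB cs k j).1 > w.1
    · rw [if_pos (by rw [hik1, hkj1, hcell.1]; exact hc),
        if_pos (by simpa using hc)]
      apply ih hks'
      · intro a b ha hb hr
        have hne : ((a, b) : Int × Int) ≠ (i, j) := by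
          simp only [ne_eq, Prod.mk.injEq, not_and]; intro h1 h2; omega
        simp only [pvVal, PySem.Dict.getD_insert, if_neg hne]
        exact hval a b ha hb hr
      · intro a b hr
        have hne : (((a, b) : Int × Int) == (i, j)) = false := by
          simp only [beq_eq_false_iff_ne, ne_eq, Prod.mk.injEq, not_and]
          intro h1 h2; omega
        simpa only [PySem.Dict.contains_insert, hne, Bool.false_or] using hfr a b hr
      · constructor
        · simp [hik1, hkj1]
        · exact Or.inr (by simp [hik2, hkj2])
    · rw [if_neg (by rw [hik1, hkj1, hcell.1]; exact hc),
        if_neg (by simpa using hc)]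
      exact ih hks' _ _ hval hfr hcell

theorem solveB_unfold (cs : List Char) (i j : Int) (h : ¬ j - i < 2) :
    solveB cs i j =
      ((if pvPairOK cs i j then
            ((solveB cs (i + 1) (j - 1)).1 + 1, "(" ++ (solveB cs (i + 1) (j - 1)).2 ++ ")")
          else ((0 : Int), "")) |> (fun init =>
        (PySem.List.pyRange (i + 1) j 1).foldl (fun acc k =>
          let r1 := solveB cs i k
          let r2 := solveB cs k j
          if r1.1 + r2.1 > acc.1 then (r1.1 + r2.1, r1.2 ++ r2.2) else acc) init) |>
        (fun res => if res.1 == 0 then (res.1, pvDots (j - i)) else res)) := by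
  rw [solveB]
  simp only [if_neg h]
  rw [List.foldl_attach (f := fun acc k =>
          let r1 := solveB cs i k
          let r2 := solveB cs k j
          if r1.1 + r2.1 > acc.1 then (r1.1 + r2.1, r1.2 ++ r2.2) else acc)]

theorem pv_cell (cs : List Char) (d i : Int) (h2 : 2 ≤ d) (hi : 0 ≤ i)
    (hil : i + d ≤ (cs.length : Int)) (t : PvDicts) (h : pvInv cs d i t) :
    pvInv cs d (i + 1) (cellA cs d t i) := by
  obtain ⟨hval, hfr⟩ := h
  have hS := solveB_unfold cs i (i + d) (by omega)
  simp only [] at hS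
  -- the B-side initial accumulator
  set init : Int × String :=
    (if pvPairOK cs i (i + d) then
      ((solveB cs (i + 1) (i + d - 1)).1 + 1, "(" ++ (solveB cs (i + 1) (i + d - 1)).2 ++ ")")
    else ((0 : Int), "")) with hinit
  -- the A-side state after the pair branch
  set t1 : PvDicts :=
    (if pvPairOK cs i (i + d) then
      (t.1.insert (i, i + d) (t.1.getD (i + 1, i + d - 1) 0 + 1),
       t.2.insert (i, i + d) ("(" ++ t.2.getD (i + 1, i + d - 1) "." ++ ")"))
    else t) with ht1
  have hval1 : ∀ a b : Int, 0 ≤ a → b ≤ (cs.length : Int) →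
      (b - a < d ∨ (b - a = d ∧ a < i)) → pvVal t1 a b = solveB cs a b := by
    intro a b ha hb hr
    have hne : ((a, b) : Int × Int) ≠ (i, i + d) := by
      simp only [ne_eq, Prod.mk.injEq, not_and]; intro h1 h2; omega
    rw [ht1]
    split
    · simp only [pvVal, PySem.Dict.getD_insert, if_neg hne]
      exact hval a b ha hb hr
    · exact hval a b ha hb hr
  have hfr1 : ∀ a b : Int, (d < b - a ∨ (b - a = d ∧ i < a)) →
      t1.1.contains (a, b) = false ∧ t1.2.contains (a, b) = false := by
    intro a b hr
    have hr' : d < b - a ∨ (b - a = d ∧ i ≤ a) := by omega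
    have hne : (((a, b) : Int × Int) == (i, i + d)) = false := by
      simp only [beq_eq_false_iff_ne, ne_eq, Prod.mk.injEq, not_and]
      intro h1 h2; omega
    rw [ht1]
    split
    · simpa only [PySem.Dict.contains_insert, hne, Bool.false_or] using hfr a b hr'
    · exact hfr a b hr'
  have hcell1 : t1.1.getD (i, i + d) 0 = init.1 ∧
      (init.1 = 0 ∨ t1.2.getD (i, i + d) "." = init.2) := by
    rw [ht1, hinit]
    by_cases hp : pvPairOK cs i (i + d)
    · have hin := hval (i + 1) (i + d - 1) (by omega) (by omega) (Or.inl (by omega))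
      have hin1 := congrArg Prod.fst hin
      have hin2 := congrArg Prod.snd hin
      simp only [pvVal] at hin1 hin2
      constructor
      · simp [hp, hin1]
      · exact Or.inr (by simp [hp, hin2])
    · have hgz := hfr i (i + d) (Or.inr ⟨by omega, le_refl i⟩)
      constructor
      · simp [hp, PySem.Dict.getD_of_not_contains t.1 0 hgz.1]
      · exact Or.inl (by simp [hp])
  have H := pv_kfold cs d i (i + d) rfl h2 hi hil (PySem.List.pyRange (i + 1) (i + d) 1)
    (fun k hk => PySem.List.mem_pyRange_one.mp hk) t1 init hval1 hfr1 hcell1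
  obtain ⟨Hval, Hfr, Hfst, Hsnd⟩ := H
  -- names for the two fold results
  set T2 : PvDicts := (PySem.List.pyRange (i + 1) (i + d) 1).foldl (fun t k =>
      if t.1.getD (i, k) 0 + t.1.getD (k, i + d) 0 > t.1.getD (i, i + d) 0 then
        (t.1.insert (i, i + d) (t.1.getD (i, k) 0 + t.1.getD (k, i + d) 0),
         t.2.insert (i, i + d) (t.2.getD (i, k) "." ++ t.2.getD (k, i + d) "."))
      else t) t1 with hT2
  set W : Int × String := (PySem.List.pyRange (i + 1) (i + d) 1).foldl (fun acc k =>
      let r1 := solveB cs i k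
      let r2 := solveB cs k (i + d)
      if r1.1 + r2.1 > acc.1 then (r1.1 + r2.1, r1.2 ++ r2.2) else acc) init with hW
  have hcellA : cellA cs d t i =
      (if T2.1.getD (i, i + d) 0 == 0 then (T2.1, T2.2.insert (i, i + d) (pvDots (i + d - i))) else T2) := by
    simp only [cellA, ← ht1, ← hT2]
  have hSolve : solveB cs i (i + d) = (if W.1 == 0 then (W.1, pvDots (i + d - i)) else W) := hS
  constructor
  · intro a b ha hb hr
    by_cases hab : ((a, b) : Int × Int) = (i, i + d)
    · have ha' : a = i := congrArg Prod.fst hab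
      have hb' : b = i + d := congrArg Prod.snd hab
      rw [ha', hb', hcellA, hSolve]
      by_cases hz : W.1 = 0
      · rw [if_pos (by rw [Hfst, hz]; rfl), if_pos (by rw [hz]; rfl)]
        simp only [pvVal, PySem.Dict.getD_insert]
        exact Prod.ext (by simp [Hfst]) rfl
      · rw [if_neg (by rw [Hfst]; simpa using hz), if_neg (by simpa using hz)]
        have hsnd : T2.2.getD (i, i + d) "." = W.2 := Hsnd.resolve_left hz
        exact Prod.ext (by simpa using Hfst) (by simpa using hsnd)
    · have hr' : b - a < d ∨ (b - a = d ∧ a < i) := by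
        rcases hr with h1 | ⟨h1, h2⟩
        · exact Or.inl h1
        · refine Or.inr ⟨h1, ?_⟩
          rcases lt_or_eq_of_le (by omega : a ≤ i) with h3 | h3
          · exact h3
          · exact absurd (by rw [h3]; congr 1; omega) hab
      rw [hcellA]
      split
      · simp only [pvVal, PySem.Dict.getD_insert, if_neg hab]
        exact Hval a b ha hb hr'
      · exact Hval a b ha hb hr'
  · intro a b hr
    have hr' : d < b - a ∨ (b - a = d ∧ i < a) := by omega
    have hne : (((a, b) : Int × Int) == (i, i + d)) = false := by
      simp only [beq_eq_false_iff_ne, ne_eq, Prod.mk.injEq, not_and]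
      intro h1 h2; omega
    rw [hcellA]
    split
    · simpa only [PySem.Dict.contains_insert, hne, Bool.false_or] using Hfr a b hr'
    · exact Hfr a b hr'

theorem pv_row (cs : List Char) (d : Int) (h2 : 2 ≤ d) (hdl : d ≤ (cs.length : Int))
    (t : PvDicts) (h : pvInv cs d 0 t) :
    pvInv cs (d + 1) 0 ((PySem.List.pyRange 0 ((cs.length : Int) - d + 1) 1).foldl (cellA cs d) t) := by
  have aux : ∀ m : Nat, (m : Int) ≤ (cs.length : Int) - d + 1 →
      pvInv cs d (m : Int) ((PySem.List.pyRange 0 (m : Int) 1).foldl (cellA cs d) t) := by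
    intro m
    induction m with
    | zero =>
      intro _
      simpa [PySem.List.pyRange_one_eq_nil (by omega : (0 : Int) ≤ 0)] using h
    | succ m ih =>
      intro hm
      have h1 : ((m + 1 : Nat) : Int) = (m : Int) + 1 := by push_cast; ring
      rw [h1, PySem.List.pyRange_one_succ_right (by omega : (0 : Int) ≤ (m : Int)),
        List.foldl_append]
      simp only [List.foldl_cons, List.foldl_nil]
      exact pv_cell cs d (m : Int) h2 (by omega) (by omega) _ (ih (by omega))
  have hfin := aux ((cs.length : Int) - d + 1).toNat
    (by rw [Int.toNat_of_nonneg (by omega)])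
  rw [Int.toNat_of_nonneg (by omega)] at hfin
  obtain ⟨hv, hf⟩ := hfin
  constructor
  · intro a b ha hb hr
    apply hv a b ha hb
    by_cases hlt : b - a < d
    · exact Or.inl hlt
    · exact Or.inr ⟨by omega, by omega⟩
  · intro a b hr
    exact hf a b (Or.inl (by omega))

theorem solveB_base (cs : List Char) (i j : Int) (h : j - i < 2) :
    solveB cs i j = (0, ".") := by
  rw [solveB]; simp [h]

theorem pv_levels (cs : List Char) (m : Nat) (hm : 2 + (m : Int) ≤ (cs.length : Int) + 1) :
    pvInv cs (2 + (m : Int)) 0 ((PySem.List.pyRange 2 (2 + (m : Int)) 1).foldl (fun t d =>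
      (PySem.List.pyRange 0 ((cs.length : Int) - d + 1) 1).foldl (cellA cs d) t)
      (PySem.Dict.empty, PySem.Dict.empty)) := by
  induction m with
  | zero =>
    rw [show ((0 : Nat) : Int) = 0 from rfl]
    rw [PySem.List.pyRange_one_eq_nil (by omega : (2 : Int) + 0 ≤ 2)]
    simp only [List.foldl_nil]
    constructor
    · intro a b ha hb hr
      have hab : b - a < 2 := by omega
      simp [pvVal, PySem.Dict.getD_empty, solveB_base cs a b hab]
    · intro a b hr
      simp [PySem.Dict.contains_empty]
  | succ m ih =>
    have h1 : ((m + 1 : Nat) : Int) = (m : Int) + 1 := by push_cast; ring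
    rw [h1, show (2 : Int) + ((m : Int) + 1) = (2 + (m : Int)) + 1 by ring,
      PySem.List.pyRange_one_succ_right (by omega : (2 : Int) ≤ 2 + (m : Int)),
      List.foldl_append]
    simp only [List.foldl_cons, List.foldl_nil]
    exact pv_row cs (2 + (m : Int)) (by omega) (by omega) _ (ih (by omega))

-- ===== VERDICT (by name: the statement is the Claim_ definition above) =====
theorem best2_spec : Claim_equal_best2 := by
  intro s _
  unfold Spec_best2 best2 best2_alt
  simp only []
  by_cases hl : ((s.toList.length : Int)) < 1
  · rw [if_pos hl, if_pos hl]
  · rw [if_neg hl, if_neg hl]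
    have hL := pv_levels s.toList ((s.toList.length : Int) - 1).toNat
      (by rw [Int.toNat_of_nonneg (by omega)]; omega)
    rw [Int.toNat_of_nonneg (by omega),
      show (2 : Int) + ((s.toList.length : Int) - 1) = (s.toList.length : Int) + 1 by ring] at hL
    obtain ⟨hv, _⟩ := hL
    exact hv 0 (s.toList.length : Int) (by omega) (by omega) (Or.inl (by omega))
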